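-- pv_equiv track=rewrite | github.com/ApenasUmSonhador/processo-seletivo-CEOS | Q6.py | particiona
-- ===== SOURCE A (Python) =====
-- def particiona(L1, L2):
--     """
--     Adotei o Quick Sort como maneira ideal e não o Merge Sort
--     devido leitura recente do livro 'Entendendo Algoritmos'
--     de Aditya Y. Bhargava, Cap 4.
--     """
--     # Ordenação Quick Sort
--     def ordena(lista):
--         if len(lista) <= 1:
--             return lista
--
--         pivo = lista[len(lista) // 2]
--         esquerda = [x for x in lista if x < pivo]
--         meio = [x for x in lista if x == pivo]
--         direita = [x for x in lista if x > pivo]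
--
--         return ordena(esquerda) + meio + ordena(direita)
--
--     # Transformo as 2 listas em uma ordenada
--     L1.extend(L2)
--     L1 = ordena(L1)
--
--     # Divido a lista, ordenada, como se pede
--     meio = len(L1)//2
--     L1, L2 = L1[:meio], L1[meio:]
--
--     return L1, L2
-- ===== SOURCE B (Python) =====
-- def particiona(L1, L2):
--     # Top-down merge sort instead of A's pivot-partition quicksort.
--     def ordena(lista):
--         if len(lista) <= 1:
--             return lista
--         meio = len(lista) // 2
--         esq = ordena(lista[:meio])
--         dire = ordena(lista[meio:])
--         res = []
--         i = j = 0
--         while i < len(esq) and j < len(dire):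
--             if esq[i] <= dire[j]:
--                 res.append(esq[i])
--                 i += 1
--             else:
--                 res.append(dire[j])
--                 j += 1
--         res.extend(esq[i:])
--         res.extend(dire[j:])
--         return res
--
--     L1.extend(L2)  # same in-place extend side effect as A
--     s = ordena(L1)
--     meio = len(s) // 2
--     return s[:meio], s[meio:]
-- ===== Notes on version B (the rewrite author's own statement) =====
-- stated objective: faster
-- what changed: Replaced the triple-filter pivot quicksort with a top-down merge sort (positional split, recursive sort of both halves, two-pointer merge); the extend of L1 and the half/half split are kept.
import Mathlib
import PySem

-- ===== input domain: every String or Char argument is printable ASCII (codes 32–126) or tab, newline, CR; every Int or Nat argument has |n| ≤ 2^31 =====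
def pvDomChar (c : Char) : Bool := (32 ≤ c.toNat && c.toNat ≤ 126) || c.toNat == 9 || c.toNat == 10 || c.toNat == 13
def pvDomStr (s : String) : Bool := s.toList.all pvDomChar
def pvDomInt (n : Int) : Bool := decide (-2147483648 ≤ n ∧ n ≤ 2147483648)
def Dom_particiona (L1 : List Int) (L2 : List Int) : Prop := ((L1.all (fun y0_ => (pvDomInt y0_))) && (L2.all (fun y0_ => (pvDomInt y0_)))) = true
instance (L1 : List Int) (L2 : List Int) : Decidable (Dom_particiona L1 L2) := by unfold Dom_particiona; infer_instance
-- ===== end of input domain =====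

-- B replaces A's pivot-partition quicksort by a top-down merge sort (same extend-then-split shape); a timing run measured B faster.
-- Both Pythons extend the caller's L1 in place identically; the equivalence proved here is about the return value.

-- ===== PORT A =====
-- quicksort 'ordena' from A: middle pivot, three comprehensions
def ordenaA (lista : List Int) : List Int :=
  if _h : lista.length ≤ 1 then lista
  else
    let pivo := lista.getD (lista.length / 2) 0   -- lista[len(lista)//2]; index always in range here
    ordenaA (lista.filter (fun x => x < pivo)) ++ lista.filter (fun x => x == pivo)
      ++ ordenaA (lista.filter (fun x => pivo < x))
termination_by lista.length
decreasing_by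
  all_goals
    have hpm : lista.getD (lista.length / 2) 0 ∈ lista := by
      rw [List.getD_eq_getElem _ _ (Nat.div_lt_self (by omega) (Nat.one_lt_two))]
      exact List.getElem_mem _
    simp only [List.length_unattach]
    conv_rhs => rw [← List.length_attach (l := lista)]
    rw [List.length_filter_lt_length_iff_exists]
    exact ⟨⟨pivo, hpm⟩, List.mem_attach _ _, by simp; exact le_of_eq (List.getD_eq_getElem?_getD ..).symm⟩

def particiona (L1 : List Int) (L2 : List Int) : List Int × List Int :=
  let l := L1 ++ L2          -- L1.extend(L2)
  let s := ordenaA l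
  let meio := s.length / 2
  (s.take meio, s.drop meio)

-- ===== PORT B =====
-- two-pointer merge of two lists (B's while loop over indices i, j)
def mergeB : List Int → List Int → List Int
  | [], ys => ys
  | x :: xs, [] => x :: xs
  | x :: xs, y :: ys =>
      if x ≤ y then x :: mergeB xs (y :: ys) else y :: mergeB (x :: xs) ys

-- B's 'ordena': top-down merge sort, positional split at len//2
def ordenaB (lista : List Int) : List Int :=
  if _h : lista.length ≤ 1 then lista
  else
    let meio := lista.length / 2
    mergeB (ordenaB (lista.take meio)) (ordenaB (lista.drop meio))
termination_by lista.length
decreasing_by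
  · simpa using by omega
  · simpa using by omega

def particiona_alt (L1 : List Int) (L2 : List Int) : List Int × List Int :=
  let l := L1 ++ L2
  let s := ordenaB l
  let meio := s.length / 2
  (s.take meio, s.drop meio)

-- ===== PRECONDITION & SPEC =====
def Spec_particiona (L1 : List Int) (L2 : List Int) (out : List Int × List Int) : Prop := out = particiona_alt L1 L2
instance (L1 : List Int) (L2 : List Int) (out : List Int × List Int) : Decidable (Spec_particiona L1 L2 out) := by unfold Spec_particiona; infer_instance

-- ===== CLAIM (what is proved, stated in full; the proofs are below) =====
def Claim_equal_particiona : Prop := ∀ (L1 : List Int) (L2 : List Int), Dom_particiona L1 L2 → Spec_particiona L1 L2 (particiona L1 L2)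

-- ===== LEMMAS AND PROOFS =====

theorem getD_half_mem (l : List Int) (h : ¬ l.length ≤ 1) : l.getD (l.length / 2) 0 ∈ l := by
  rw [List.getD_eq_getElem _ _ (Nat.div_lt_self (by omega) (Nat.one_lt_two))]
  exact List.getElem_mem _

theorem filter_lt_length (p : Int) (l : List Int) (hp : p ∈ l) (q : Int → Bool) (hq : q p = false) :
    (l.filter q).length < l.length :=
  List.length_filter_lt_length_iff_exists.mpr ⟨p, hp, by simp [hq]⟩

theorem count_filter_ite (q : Int → Bool) (a : Int) (l : List Int) :
    (l.filter q).count a = if q a then l.count a else 0 := by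
  split
  next hq => exact List.count_filter hq
  next hq =>
    refine List.count_eq_zero.mpr ?_
    intro hmem
    have := (List.mem_filter.mp hmem).2
    simp_all

theorem three_filter_perm (p : Int) (l : List Int) :
    ((l.filter fun x => decide (x < p)) ++ (l.filter fun x => x == p)
      ++ (l.filter fun x => decide (p < x))).Perm l := by
  rw [List.perm_iff_count]
  intro a
  simp only [List.count_append, count_filter_ite]
  rcases lt_trichotomy a p with hc | hc | hc
  · simp [hc, ne_of_lt hc, not_lt_of_gt hc]
  · subst hc; simp
  · simp [hc, ne_of_gt hc, not_lt_of_gt hc]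

theorem pairwise_filter_eq (p : Int) (l : List Int) :
    List.Pairwise (· ≤ ·) (l.filter (fun x => x == p)) := by
  rw [List.pairwise_iff_forall_sublist]
  intro a b hs
  have ha := (List.mem_filter.mp (hs.subset (show a ∈ [a, b] by simp))).2
  have hb := (List.mem_filter.mp (hs.subset (show b ∈ [a, b] by simp))).2
  simp at ha hb; omega

theorem ordenaA_perm (l : List Int) : (ordenaA l).Perm l := by
  generalize hn : l.length = n
  induction n using Nat.strong_induction_on generalizing l with
  | _ n ih =>
    subst hn
    rw [ordenaA.eq_def]
    split
    · exact List.Perm.refl l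
    next h =>
      have hpm := getD_half_mem l h
      refine List.Perm.trans (List.Perm.append (List.Perm.append ?_ (List.Perm.refl _)) ?_)
        (three_filter_perm (l.getD (l.length / 2) 0) l)
      · exact ih _ (filter_lt_length _ _ hpm _ (by simp)) _ rfl
      · exact ih _ (filter_lt_length _ _ hpm _ (by simp)) _ rfl

theorem ordenaA_sorted (l : List Int) : List.Pairwise (· ≤ ·) (ordenaA l) := by
  generalize hn : l.length = n
  induction n using Nat.strong_induction_on generalizing l with
  | _ n ih =>
    subst hn
    rw [ordenaA.eq_def]
    split
    next h =>
      rcases l with _ | ⟨a, _ | ⟨b, t⟩⟩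
      · simp
      · simp
      · simp at h
    next h =>
      have hpm := getD_half_mem l h
      set p := l.getD (l.length / 2) 0 with hp
      have ih1 := ih _ (filter_lt_length p _ hpm _ (by simp)) (l.filter fun x => decide (x < p)) rfl
      have ih2 := ih _ (filter_lt_length p _ hpm _ (by simp)) (l.filter fun x => decide (p < x)) rfl
      rw [List.pairwise_append]
      refine ⟨?_, ih2, ?_⟩
      · rw [List.pairwise_append]
        refine ⟨ih1, pairwise_filter_eq _ _, ?_⟩
        intro a ha b hb
        have ha' := (List.mem_filter.mp ((ordenaA_perm _).mem_iff.mp ha)).2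
        have hb' := (List.mem_filter.mp hb).2
        simp at ha' hb'; omega
      · intro a ha b hb
        have hb' := (List.mem_filter.mp ((ordenaA_perm _).mem_iff.mp hb)).2
        simp at hb'
        rcases List.mem_append.mp ha with ha | ha
        · have ha' := (List.mem_filter.mp ((ordenaA_perm _).mem_iff.mp ha)).2
          simp at ha'; omega
        · have ha' := (List.mem_filter.mp ha).2
          simp at ha'; omega

theorem mergeB_perm (xs ys : List Int) : (mergeB xs ys).Perm (xs ++ ys) := by
  fun_induction mergeB xs ys with
  | case1 ys => simp
  | case2 x xs => simp
  | case3 x xs y ys hxy ih => simpa using ih.cons x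
  | case4 x xs y ys hxy ih =>
    refine (ih.cons y).trans ?_
    simpa using (List.perm_middle (a := y) (l₁ := x :: xs) (l₂ := ys)).symm

theorem mergeB_sorted (xs ys : List Int) (hx : List.Pairwise (· ≤ ·) xs)
    (hy : List.Pairwise (· ≤ ·) ys) : List.Pairwise (· ≤ ·) (mergeB xs ys) := by
  fun_induction mergeB xs ys with
  | case1 ys => exact hy
  | case2 x xs => exact hx
  | case3 x xs y ys hxy ih =>
    rw [List.pairwise_cons] at hx ⊢
    refine ⟨?_, ih hx.2 hy⟩
    intro b hb
    rcases (List.mem_append.mp ((mergeB_perm _ _).mem_iff.mp hb)) with hb | hb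
    · exact hx.1 b hb
    · rcases List.mem_cons.mp hb with rfl | hb
      · exact hxy
      · exact le_trans hxy ((List.pairwise_cons.mp hy).1 b hb)
  | case4 x xs y ys hxy ih =>
    rw [List.pairwise_cons] at hy ⊢
    refine ⟨?_, ih hx hy.2⟩
    intro b hb
    rcases (List.mem_append.mp ((mergeB_perm _ _).mem_iff.mp hb)) with hb | hb
    · rcases List.mem_cons.mp hb with rfl | hb
      · omega
      · exact le_trans (by omega) ((List.pairwise_cons.mp hx).1 b hb)
    · exact hy.1 b hb

theorem ordenaB_perm (l : List Int) : (ordenaB l).Perm l := by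
  fun_induction ordenaB l with
  | case1 l h => exact List.Perm.refl l
  | case2 l h meio ih1 ih2 =>
    refine (mergeB_perm _ _).trans ?_
    refine (ih1.append ih2).trans ?_
    simp

theorem ordenaB_sorted (l : List Int) : List.Pairwise (· ≤ ·) (ordenaB l) := by
  fun_induction ordenaB l with
  | case1 l h => rcases l with _ | ⟨a, _ | ⟨b, t⟩⟩ <;> simp_all
  | case2 l h meio ih1 ih2 => exact mergeB_sorted _ _ ih1 ih2

theorem ordena_eq (l : List Int) : ordenaA l = ordenaB l :=
  List.Perm.eq_of_pairwise (fun _ _ _ _ h1 h2 => le_antisymm h1 h2)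
    (ordenaA_sorted l) (ordenaB_sorted l) ((ordenaA_perm l).trans (ordenaB_perm l).symm)

-- ===== VERDICT (by name: the statement is the Claim_ definition above) =====
theorem particiona_spec : Claim_equal_particiona := by
  intro L1 L2 _
  unfold Spec_particiona particiona particiona_alt
  simp [ordena_eq]
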